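-- pv_equiv track=rewrite | github.com/joosep-mm/beer-game | app.py | find_average_demand
-- ===== SOURCE A (Python) =====
-- def find_average_demand(weeks) -> dict[str, int]:
--     result = {}
--     count = 0
--     for week in weeks:
--         count += 1
--         for role, amounts in week['roles'].items():
--             demand = amounts['incoming_orders']
--             result[role] = result.get(role, 0) + demand
--
--     for key, value in result.items():
--         result[key] = value // count
--
--     return result
-- ===== SOURCE B (Python) =====
-- def _contrib(week, role):
--     amounts = week['roles'].get(role)
--     return amounts['incoming_orders'] if amounts is not None else 0
--
--
-- def find_average_demand(weeks) -> dict[str, int]: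
--     count = len(weeks)
--     roles = []
--     for week in weeks:
--         for role in week['roles']:
--             if role not in roles:
--                 roles.append(role)
--     result = {}
--     for role in roles:
--         total = 0
--         for week in weeks:
--             total += _contrib(week, role)
--         result[role] = total // count
--     return result
-- ===== Notes on version B (the rewrite author's own statement) =====
-- stated objective: alternative
-- what changed: Transposes A's week-major single-pass dict accumulation into a role-major shape: one pass collects the ordered set of role names, then each role gets its own scan over all weeks summing its incoming_orders, divided by the total week count.
import Mathlib
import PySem

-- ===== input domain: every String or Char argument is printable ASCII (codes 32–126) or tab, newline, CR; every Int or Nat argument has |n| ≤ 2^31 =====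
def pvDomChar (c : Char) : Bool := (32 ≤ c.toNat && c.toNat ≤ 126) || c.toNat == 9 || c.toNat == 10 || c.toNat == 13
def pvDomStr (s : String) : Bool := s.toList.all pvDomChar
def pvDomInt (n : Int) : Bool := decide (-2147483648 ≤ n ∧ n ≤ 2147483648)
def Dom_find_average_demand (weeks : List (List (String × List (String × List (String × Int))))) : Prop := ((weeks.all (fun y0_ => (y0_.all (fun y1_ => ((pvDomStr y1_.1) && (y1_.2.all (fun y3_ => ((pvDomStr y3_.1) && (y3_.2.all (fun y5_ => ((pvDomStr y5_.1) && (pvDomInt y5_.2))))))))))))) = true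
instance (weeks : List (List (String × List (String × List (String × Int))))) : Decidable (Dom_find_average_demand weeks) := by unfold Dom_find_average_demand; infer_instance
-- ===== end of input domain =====

-- B re-implements A role-major (role index first, then one scan per role) instead of
-- A's week-major accumulation; same results, no speed claim.

-- ===== PORT A =====
-- shared accessors for the two dict lookups both Pythons perform
def pvRoles (week : List (String × List (String × List (String × Int)))) :
    PySem.Dict String (List (String × Int)) :=
  match (PySem.Dict.ofList week).get? "roles" with
  | some rd => PySem.Dict.ofList rd
  | none => PySem.Dict.empty   -- Python raises KeyError here; excluded by Pre_

def pvDemand (amounts : List (String × Int)) : Int :=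
  (PySem.Dict.ofList amounts).getD "incoming_orders" 0   -- Python raises when the key is missing; excluded by Pre_

def find_average_demand (weeks : List (List (String × List (String × List (String × Int))))) : List (String × Int) :=
  let st := weeks.foldl
    (fun (st : PySem.Dict String Int × Int) week =>
      ((pvRoles week).items.foldl
          (fun r p => r.insert p.1 (r.getD p.1 0 + pvDemand p.2)) st.1,
       st.2 + 1))
    (PySem.Dict.empty, (0 : Int))
  (st.1.items.foldl
      (fun (r : PySem.Dict String Int) p => r.insert p.1 (PySem.Int.floordiv p.2 st.2))
      st.1).items

-- ===== PORT B =====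
def pvContrib (week : List (String × List (String × List (String × Int)))) (role : String) : Int :=
  match (pvRoles week).get? role with
  | some amounts => pvDemand amounts
  | none => 0

def find_average_demand_alt (weeks : List (List (String × List (String × List (String × Int))))) : List (String × Int) :=
  ((weeks.foldl (fun acc week => (pvRoles week).keys.foldl PySem.Set.add acc)
      (PySem.Set.empty : PySem.Set String)).foldl
    (fun (out : PySem.Dict String Int) role =>
      out.insert role (PySem.Int.floordiv
        (weeks.foldl (fun t week => t + pvContrib week role) 0) (weeks.length : Int)))
    PySem.Dict.empty).items

-- ===== PRECONDITION & SPEC =====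
-- Pre_ excludes exactly the inputs where both Pythons raise KeyError:
-- a week without the key 'roles', or a role whose amounts lack 'incoming_orders'.
def Pre_find_average_demand (weeks : List (List (String × List (String × List (String × Int))))) : Prop :=
  (weeks.all (fun week =>
    match (PySem.Dict.ofList week).get? "roles" with
    | some rd => (PySem.Dict.ofList rd).items.all
        (fun p => (PySem.Dict.ofList p.2).contains "incoming_orders")
    | none => false)) = true
instance (weeks : List (List (String × List (String × List (String × Int))))) : Decidable (Pre_find_average_demand weeks) := by unfold Pre_find_average_demand; infer_instance

def pvWitness_find_average_demand : (List (List (String × List (String × List (String × Int))))) :=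
  [[("roles", [("retailer", [("incoming_orders", 4)]), ("factory", [("incoming_orders", 7)])])],
   [("roles", [("retailer", [("incoming_orders", 5)])])]]

def Spec_find_average_demand (weeks : List (List (String × List (String × List (String × Int))))) (out : List (String × Int)) : Prop := out = find_average_demand_alt weeks
instance (weeks : List (List (String × List (String × List (String × Int))))) (out : List (String × Int)) : Decidable (Spec_find_average_demand weeks out) := by unfold Spec_find_average_demand; infer_instance

-- ===== CLAIM (what is proved, stated in full; the proofs are below) =====
def Claim_equal_find_average_demand : Prop := ∀ (weeks : List (List (String × List (String × List (String × Int))))), Dom_find_average_demand weeks → Pre_find_average_demand weeks → Spec_find_average_demand weeks (find_average_demand weeks)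

-- ===== LEMMAS AND PROOFS =====

-- A's per-week accumulation step and B's per-role total, named for the proofs
def stepA (d : PySem.Dict String Int) (week : List (String × List (String × List (String × Int)))) : PySem.Dict String Int :=
  (pvRoles week).items.foldl (fun r p => r.insert p.1 (r.getD p.1 0 + pvDemand p.2)) d

def pvSum (weeks : List (List (String × List (String × List (String × Int))))) (role : String) : Int :=
  weeks.foldl (fun t week => t + pvContrib week role) 0

def pvOrder (weeks : List (List (String × List (String × List (String × Int))))) : PySem.Set String :=
  weeks.foldl (fun acc week => (pvRoles week).keys.foldl PySem.Set.add acc) PySem.Set.empty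

lemma pair_fold (weeks : List (List (String × List (String × List (String × Int)))))
    (d : PySem.Dict String Int) (c : Int) :
    weeks.foldl (fun st w => (stepA st.1 w, st.2 + 1)) (d, c)
      = (weeks.foldl stepA d, c + weeks.length) := by
  induction weeks generalizing d c with
  | nil => simp
  | cons w ws ih => simp [List.foldl_cons, ih]; ring

lemma filter_key_of_not_mem {α : Type} (l : List (String × α)) (k : String)
    (h : k ∉ l.map Prod.fst) : l.filter (fun p => p.1 == k) = [] := by
  induction l with
  | nil => rfl
  | cons p l ih =>
    have h1 : k ≠ p.1 := fun he => h (by simp [he])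
    have h2 : k ∉ l.map Prod.fst := fun hm => h (by simp [hm])
    rw [List.filter_cons, ih h2]
    simp [show ¬(p.1 = k) from fun he => h1 he.symm]

lemma filter_key_of_mem {α : Type} (l : List (String × α)) (k : String) (v : α)
    (hnd : (l.map Prod.fst).Nodup) (h : (k, v) ∈ l) :
    l.filter (fun p => p.1 == k) = [(k, v)] := by
  induction l with
  | nil => simp at h
  | cons p l ih =>
    simp only [List.map_cons, List.nodup_cons] at hnd
    rcases List.mem_cons.mp h with h | h
    · subst h
      rw [List.filter_cons, filter_key_of_not_mem l k (by simpa using hnd.1)]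
      simp
    · have hk : ¬(p.1 = k) := by
        intro he
        exact hnd.1 (by rw [he]; exact List.mem_map.mpr ⟨(k, v), h, rfl⟩)
      rw [List.filter_cons, ih hnd.2 h]
      simp [hk]

lemma foldA_getD (ps : List (String × List (String × Int))) :
    ∀ (d : PySem.Dict String Int) (k : String),
    (ps.foldl (fun r p => r.insert p.1 (r.getD p.1 0 + pvDemand p.2)) d).getD k 0
      = d.getD k 0 + ((ps.filter (fun p => p.1 == k)).map (fun p => pvDemand p.2)).sum := by
  induction ps with
  | nil => simp
  | cons p ps ih =>
    intro d k
    rw [List.foldl_cons, ih, List.filter_cons]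
    by_cases hk : p.1 = k
    · subst hk
      simp [PySem.Dict.getD_insert_self]
      ring
    · simp [PySem.Dict.getD_insert, show ¬(k = p.1) from fun h => hk h.symm, hk]

lemma stepA_getD (d : PySem.Dict String Int)
    (week : List (String × List (String × List (String × Int)))) (k : String) :
    (stepA d week).getD k 0 = d.getD k 0 + pvContrib week k := by
  have hnd : ((pvRoles week).items.map Prod.fst).Nodup := by
    have : (pvRoles week).keys.Nodup := by
      unfold pvRoles
      cases h : (PySem.Dict.ofList week).get? "roles" with
      | some rd => simp [PySem.Dict.nodup_keys_ofList rd]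
      | none => simp [PySem.Dict.keys_empty]
    simpa [PySem.Dict.keys] using this
  unfold stepA pvContrib
  rw [foldA_getD]
  cases h : (pvRoles week).get? k with
  | some a =>
    rw [filter_key_of_mem _ k a hnd (PySem.Dict.mem_items_of_get?_eq_some _ h)]
    simp
  | none =>
    rw [filter_key_of_not_mem _ k]
    · simp
    · have := (PySem.Dict.get?_eq_none_iff_not_mem_keys (d := pvRoles week) (k := k)).mp h
      simpa [PySem.Dict.keys] using this

lemma pvSum_cons (w : List (String × List (String × List (String × Int))))
    (ws : List (List (String × List (String × List (String × Int))))) (k : String) :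
    pvSum (w :: ws) k = pvContrib w k + pvSum ws k := by
  have h : ∀ (l : List (List (String × List (String × List (String × Int))))) (t : Int),
      l.foldl (fun t week => t + pvContrib week k) t = t + pvSum l k := by
    intro l
    induction l with
    | nil => intro t; simp [pvSum]
    | cons x xs ih =>
      intro t
      rw [pvSum, List.foldl_cons, List.foldl_cons, ih, ih]
      ring
  rw [pvSum, List.foldl_cons, h]
  simp

lemma phase1_getD (weeks : List (List (String × List (String × List (String × Int))))) :
    ∀ (d : PySem.Dict String Int) (k : String),
    (weeks.foldl stepA d).getD k 0 = d.getD k 0 + pvSum weeks k := by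
  induction weeks with
  | nil => intro d k; simp [pvSum]
  | cons w ws ih =>
    intro d k
    rw [List.foldl_cons, ih, stepA_getD, pvSum_cons]
    ring

lemma stepA_keys (d : PySem.Dict String Int)
    (week : List (String × List (String × List (String × Int)))) :
    (stepA d week).keys = (pvRoles week).keys.foldl PySem.Set.add d.keys := by
  unfold stepA
  have := PySem.Dict.keys_foldl_insert_key ((pvRoles week).items) (Prod.fst)
    (fun r p => r.getD p.1 0 + pvDemand p.2) d
  rw [this]
  rfl

lemma phase1_keys (weeks : List (List (String × List (String × List (String × Int))))) :
    ∀ (d : PySem.Dict String Int),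
    (weeks.foldl stepA d).keys
      = weeks.foldl (fun acc week => (pvRoles week).keys.foldl PySem.Set.add acc) d.keys := by
  induction weeks with
  | nil => intro d; simp
  | cons w ws ih => intro d; rw [List.foldl_cons, ih, stepA_keys, List.foldl_cons]

lemma phase1_nodup (weeks : List (List (String × List (String × List (String × Int))))) :
    ∀ (d : PySem.Dict String Int), d.keys.Nodup → (weeks.foldl stepA d).keys.Nodup := by
  induction weeks with
  | nil => intro d h; simpa using h
  | cons w ws ih =>
    intro d h
    rw [List.foldl_cons]
    exact ih _ (PySem.Dict.nodup_keys_foldl_insert_key _ _ _ _ h)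

lemma fold2_getD_not_mem (ps : List (String × Int)) :
    ∀ (d : PySem.Dict String Int) (c : Int) (k : String), k ∉ ps.map Prod.fst →
    (ps.foldl (fun r p => r.insert p.1 (PySem.Int.floordiv p.2 c)) d).getD k 0 = d.getD k 0 := by
  induction ps with
  | nil => intro d c k _; rfl
  | cons p ps ih =>
    intro d c k h
    have h1 : k ≠ p.1 := fun he => h (by simp [he])
    have h2 : k ∉ ps.map Prod.fst := fun hm => h (by simp [hm])
    rw [List.foldl_cons, ih _ _ _ h2, PySem.Dict.getD_insert]
    simp [h1]

lemma fold2_getD_mem (ps : List (String × Int)) :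
    ∀ (d : PySem.Dict String Int) (c : Int) (k : String) (v : Int),
    (ps.map Prod.fst).Nodup → (k, v) ∈ ps →
    (ps.foldl (fun r p => r.insert p.1 (PySem.Int.floordiv p.2 c)) d).getD k 0
      = PySem.Int.floordiv v c := by
  induction ps with
  | nil => intro _ _ _ _ _ h; simp at h
  | cons p ps ih =>
    intro d c k v hnd h
    simp only [List.map_cons, List.nodup_cons] at hnd
    rw [List.foldl_cons]
    rcases List.mem_cons.mp h with h | h
    · subst h
      rw [fold2_getD_not_mem ps _ c k (by simpa using hnd.1)]
      simp [PySem.Dict.getD_insert_self]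
    · exact ih _ c k v hnd.2 h

lemma set_update_of_subset (s : PySem.Set String) (xs : List String)
    (h : ∀ x ∈ xs, x ∈ s) : PySem.Set.update s xs = s := by
  rw [PySem.Set.update_eq_append_filter]
  have : (PySem.Set.ofList xs).filter (fun y => !(PySem.Set.contains s y)) = [] := by
    rw [List.filter_eq_nil_iff]
    intro y hy
    simpa using h y ((PySem.Set.mem_ofList _ _).mp hy)
  rw [this, List.append_nil]

lemma pvOrder_nodup (weeks : List (List (String × List (String × List (String × Int))))) :
    (pvOrder weeks).Nodup := by
  unfold pvOrder
  have : ∀ (l : List (List (String × List (String × List (String × Int)))))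
      (s : PySem.Set String), s.Nodup →
      (l.foldl (fun acc week => (pvRoles week).keys.foldl PySem.Set.add acc) s).Nodup := by
    intro l
    induction l with
    | nil => intro s h; simpa using h
    | cons w ws ih =>
      intro s h
      rw [List.foldl_cons]
      refine ih _ ?_
      have : (pvRoles w).keys.foldl PySem.Set.add s = PySem.Set.update s (pvRoles w).keys := rfl
      rw [this]
      exact PySem.Set.nodup_update _ _ h
  exact this weeks PySem.Set.empty (by simp [PySem.Set.empty])

-- ===== VERDICT (by name: the statement is the Claim_ definition above) =====
theorem find_average_demand_spec : Claim_equal_find_average_demand := by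
  intro weeks _ _
  unfold Spec_find_average_demand find_average_demand find_average_demand_alt
  have hpair := pair_fold weeks PySem.Dict.empty 0
  have hstep : (fun (st : PySem.Dict String Int × Int) week =>
      ((pvRoles week).items.foldl
          (fun r p => r.insert p.1 (r.getD p.1 0 + pvDemand p.2)) st.1,
       st.2 + 1)) = (fun st w => (stepA st.1 w, st.2 + 1)) := rfl
  rw [hstep, hpair]
  set d1 := weeks.foldl stepA PySem.Dict.empty with hd1
  have hnd1 : d1.keys.Nodup := phase1_nodup weeks _ (by simp)
  have hkeys1 : d1.keys = pvOrder weeks := by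
    rw [hd1, phase1_keys]
    rfl
  have hgetD1 : ∀ k, d1.getD k 0 = pvSum weeks k := by
    intro k
    rw [hd1, phase1_getD]
    simp
  -- phase 2 of A: the final dict has the same keys and each value divided
  set c : Int := (0 : Int) + weeks.length with hc
  set d2 := d1.items.foldl (fun (r : PySem.Dict String Int) p =>
      r.insert p.1 (PySem.Int.floordiv p.2 c)) d1 with hd2
  have hkeys2 : d2.keys = d1.keys := by
    rw [hd2]
    rw [PySem.Dict.keys_foldl_insert_key d1.items Prod.fst
      (fun r p => PySem.Int.floordiv p.2 c) d1]
    have : d1.items.map Prod.fst = d1.keys := rfl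
    rw [this]
    exact set_update_of_subset _ _ (fun x hx => hx)
  have hnd2 : d2.keys.Nodup := by rw [hkeys2]; exact hnd1
  have hgetD2 : ∀ k ∈ d1.keys, d2.getD k 0 = PySem.Int.floordiv (pvSum weeks k) c := by
    intro k hk
    have hmem : (k, d1.getD k 0) ∈ d1.items := by
      have hit := PySem.Dict.items_eq_map_keys d1 hnd1 0
      rw [hit]
      exact List.mem_map.mpr ⟨k, hk, rfl⟩
    rw [hd2, fold2_getD_mem d1.items d1 c k (d1.getD k 0) hnd1 hmem, hgetD1]
  -- B's dict: fresh distinct keys over pvOrder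
  have hBitems : (((pvOrder weeks)).foldl
      (fun (out : PySem.Dict String Int) role =>
        out.insert role (PySem.Int.floordiv
          (weeks.foldl (fun t week => t + pvContrib week role) 0) (weeks.length : Int)))
      PySem.Dict.empty).items
      = (pvOrder weeks).map (fun r => (r, PySem.Int.floordiv (pvSum weeks r) (weeks.length : Int))) := by
    have := PySem.Dict.items_foldl_insert_fresh (l := pvOrder weeks) (k := fun r => r)
      (v := fun r => PySem.Int.floordiv
        (weeks.foldl (fun t week => t + pvContrib week r) 0) (weeks.length : Int))
      (d := PySem.Dict.empty)
      (by intro a _; simp) (by simpa using pvOrder_nodup weeks)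
    rw [this]
    simp [pvSum, PySem.Dict.empty]
  have hAitems : d2.items = (pvOrder weeks).map
      (fun k => (k, PySem.Int.floordiv (pvSum weeks k) c)) := by
    rw [PySem.Dict.items_eq_map_keys d2 hnd2 0, hkeys2, hkeys1]
    refine List.map_congr_left ?_
    intro k hk
    rw [hgetD2 k (by rw [hkeys1]; exact hk)]
  show d2.items = _
  rw [hAitems]
  have hcc : c = (weeks.length : Int) := by rw [hc]; ring
  rw [hcc]
  exact hBitems.symm
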